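-- pv_equiv track=rewrite | github.com/rdinesh808/pylogicalprograms | pylogicalprograms/patterns/DineshNamePattern.py | print_s
-- ===== SOURCE A (Python) =====
-- def print_s(size):
--     start = 1
--     end = size + 1
--     s_lines = []
--     for i in range(start, end):
--         line = ""
--         for j in range(1, end):
--             if i == 1 or i == size or i == size // 2 + 1 or (j == 1 and i < size // 2 + 1) or (j == size and i > size // 2 + 1):
--                 line += "* "
--             else:
--                 line += "  "
--         s_lines.append(line)
--     return s_lines
-- ===== SOURCE B (Python) =====
-- def print_s(size):
--     mid = size // 2 + 1
--     lines = []
--     for i in range(1, size + 1):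
--         if i == 1 or i == size or i == mid:
--             lines.append("* " * size)
--         else:
--             cells = ["  "] * size
--             if i < mid:
--                 cells[0] = "* "
--             else:
--                 cells[-1] = "* "
--             lines.append("".join(cells))
--     return lines
-- ===== Notes on version B (the rewrite author's own statement) =====
-- stated objective: simpler
-- what changed: B classifies each row once (full bar for first/last/middle row, otherwise a blank row with one star placed at a computed position) instead of re-testing A's five-way OR condition for every cell of every row.
import Mathlib
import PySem

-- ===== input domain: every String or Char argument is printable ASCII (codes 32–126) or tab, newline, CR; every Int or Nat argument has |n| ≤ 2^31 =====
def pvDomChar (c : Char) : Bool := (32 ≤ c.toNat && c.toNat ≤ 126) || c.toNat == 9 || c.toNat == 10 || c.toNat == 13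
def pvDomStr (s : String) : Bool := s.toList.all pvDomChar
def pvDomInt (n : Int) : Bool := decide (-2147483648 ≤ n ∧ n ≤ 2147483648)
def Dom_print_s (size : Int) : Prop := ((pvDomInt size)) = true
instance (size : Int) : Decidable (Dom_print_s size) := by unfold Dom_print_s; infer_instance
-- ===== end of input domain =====

-- B builds each row at once (bar row / single star at a computed cell) instead of A's
-- per-cell five-way OR test; same return value, no speed claim.

-- ===== PORT A =====
def print_s (size : Int) : List String :=
  let start : Int := 1
  let «end» : Int := size + 1
  (PySem.List.pyRange start «end» 1).foldl
    (fun s_lines i =>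
      s_lines ++
        [(PySem.List.pyRange 1 «end» 1).foldl
          (fun line j =>
            line ++
              (if i = 1 ∨ i = size ∨ i = PySem.Int.floordiv size 2 + 1 ∨
                  (j = 1 ∧ i < PySem.Int.floordiv size 2 + 1) ∨
                  (j = size ∧ i > PySem.Int.floordiv size 2 + 1)
               then "* " else "  "))
          ""]) []

-- ===== PORT B =====
def print_s_alt (size : Int) : List String :=
  let mid := PySem.Int.floordiv size 2 + 1
  (PySem.List.pyRange 1 (size + 1) 1).map (fun i =>
    if i = 1 ∨ i = size ∨ i = mid then
      -- "* " * size : Python string repetition (count clamps at 0; size ≥ 1 whenever a row exists)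
      PySem.Str.join "" (List.replicate size.toNat "* ")
    else
      let cells := List.replicate size.toNat ("  " : String)
      PySem.Str.join ""
        (if i < mid then cells.set 0 "* "
         -- cells[-1] = "* ": last cell; cells is nonempty since size ≥ 1 here
         else cells.set (cells.length - 1) "* "))

-- ===== PRECONDITION & SPEC =====
def Spec_print_s (size : Int) (out : List String) : Prop := out = print_s_alt size
instance (size : Int) (out : List String) : Decidable (Spec_print_s size out) := by unfold Spec_print_s; infer_instance

-- ===== CLAIM (what is proved, stated in full; the proofs are below) =====
def Claim_equal_print_s : Prop := ∀ (size : Int), Dom_print_s size → Spec_print_s size (print_s size)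

-- ===== LEMMAS AND PROOFS =====

lemma print_s_def (size : Int) :
    print_s size =
      (PySem.List.pyRange 1 (size + 1) 1).foldl
        (fun s_lines i =>
          s_lines ++
            [(PySem.List.pyRange 1 (size + 1) 1).foldl
              (fun line j =>
                line ++
                  (if i = 1 ∨ i = size ∨ i = PySem.Int.floordiv size 2 + 1 ∨
                      (j = 1 ∧ i < PySem.Int.floordiv size 2 + 1) ∨
                      (j = size ∧ i > PySem.Int.floordiv size 2 + 1)
                   then "* " else "  "))
              ""]) [] := rfl

lemma print_s_alt_def (size : Int) :
    print_s_alt size =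
      (PySem.List.pyRange 1 (size + 1) 1).map (fun i =>
        if i = 1 ∨ i = size ∨ i = PySem.Int.floordiv size 2 + 1 then
          PySem.Str.join "" (List.replicate size.toNat "* ")
        else
          PySem.Str.join ""
            (if i < PySem.Int.floordiv size 2 + 1 then
              (List.replicate size.toNat ("  " : String)).set 0 "* "
             else
              (List.replicate size.toNat ("  " : String)).set
                ((List.replicate size.toNat ("  " : String)).length - 1) "* ")) := rfl

lemma chars_join_nil_sep (parts : List (List Char)) :
    PySem.Chars.join [] parts = parts.flatten := by
  induction parts with
  | nil => simp [PySem.Chars.join_nil]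
  | cons p rest ih =>
    cases rest with
    | nil => simp [PySem.Chars.join_singleton]
    | cons q rs =>
      rw [PySem.Chars.join_cons_cons, ih]
      simp

lemma toList_join_nilsep (parts : List String) :
    (PySem.Str.join "" parts).toList = (parts.map String.toList).flatten := by
  rw [PySem.Str.toList_join]
  simp [chars_join_nil_sep]

lemma toList_strfold {α : Type} (g : α → String) (l : List α) (init : String) :
    (l.foldl (fun s j => s ++ g j) init).toList
      = init.toList ++ (l.map (fun j => (g j).toList)).flatten := by
  induction l generalizing init with
  | nil => simp
  | cons x xs ih => simp [ih, String.toList_append]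

lemma map_range_ite {α : Type} (n t : Nat) (a b : α) (_ht : t < n) :
    (List.range n).map (fun k => if k = t then a else b)
      = (List.replicate n b).set t a := by
  refine List.ext_getElem (by simp) ?_
  intro k h1 h2
  simp only [List.getElem_map, List.getElem_range, List.getElem_set, List.getElem_replicate]
  split_ifs with h h' <;> first | rfl | omega

-- ===== VERDICT (by name: the statement is the Claim_ definition above) =====
theorem print_s_spec : Claim_equal_print_s := by
  intro size _
  unfold Spec_print_s
  rw [print_s_def, print_s_alt_def, PySem.List.foldl_append_singleton_eq_map, List.nil_append]
  apply List.map_congr_left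
  intro i hi
  rw [PySem.List.mem_pyRange_one] at hi
  obtain ⟨hi1, hi2⟩ := hi
  have hnn : (size.toNat : Int) = size := Int.toNat_of_nonneg (by omega)
  have hn1 : 1 ≤ size.toNat := by omega
  have hlen : ((size + 1) - 1).toNat = size.toNat := by omega
  set m := PySem.Int.floordiv size 2 with hm
  rw [← String.toList_inj, toList_strfold]
  by_cases hbar : i = 1 ∨ i = size ∨ i = m + 1
  · rw [if_pos hbar, toList_join_nilsep]
    have hA : (PySem.List.pyRange 1 (size + 1) 1).map
        (fun j => ((if i = 1 ∨ i = size ∨ i = m + 1 ∨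
            (j = 1 ∧ i < m + 1) ∨ (j = size ∧ i > m + 1)
          then ("* " : String) else "  ")).toList)
        = List.replicate size.toNat ("* " : String).toList := by
      rw [List.eq_replicate_iff]
      refine ⟨by simp [PySem.List.length_pyRange_one], ?_⟩
      intro cs hcs
      obtain ⟨j, hj, rfl⟩ := List.mem_map.mp hcs
      rw [if_pos (by tauto)]
    rw [hA]
    simp [List.map_replicate]
  · rw [if_neg hbar, toList_join_nilsep]
    push Not at hbar
    obtain ⟨hb1, hb2, hb3⟩ := hbar
    rw [show ("" : String).toList = [] from rfl, List.nil_append]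
    refine congrArg List.flatten ?_
    by_cases hlt : i < m + 1
    · rw [if_pos hlt]
      calc (PySem.List.pyRange 1 (size + 1) 1).map
            (fun j => ((if i = 1 ∨ i = size ∨ i = m + 1 ∨
                (j = 1 ∧ i < m + 1) ∨ (j = size ∧ i > m + 1)
              then ("* " : String) else "  ")).toList)
          = (List.range size.toNat).map
              (fun k => if k = 0 then ("* " : String).toList else ("  " : String).toList) := by
            rw [PySem.List.pyRange_one, List.map_map, hlen]
            apply List.map_congr_left
            intro k hk
            simp only [Function.comp, apply_ite String.toList]
            refine if_congr ?_ rfl rfl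
            constructor
            · rintro (h | h | h | ⟨h, _⟩ | ⟨_, h⟩) <;> omega
            · intro h
              exact Or.inr (Or.inr (Or.inr (Or.inl ⟨by omega, hlt⟩)))
        _ = (List.replicate size.toNat ("  " : String).toList).set 0 ("* " : String).toList :=
            map_range_ite _ 0 _ _ (by omega)
        _ = ((List.replicate size.toNat ("  " : String)).set 0 "* ").map String.toList := by
            simp [List.map_set]
    · rw [if_neg hlt]
      have hgt : m + 1 < i := by omega
      calc (PySem.List.pyRange 1 (size + 1) 1).map
            (fun j => ((if i = 1 ∨ i = size ∨ i = m + 1 ∨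
                (j = 1 ∧ i < m + 1) ∨ (j = size ∧ i > m + 1)
              then ("* " : String) else "  ")).toList)
          = (List.range size.toNat).map
              (fun k => if k = size.toNat - 1 then ("* " : String).toList
                        else ("  " : String).toList) := by
            rw [PySem.List.pyRange_one, List.map_map, hlen]
            apply List.map_congr_left
            intro k hk
            simp only [Function.comp, apply_ite String.toList]
            refine if_congr ?_ rfl rfl
            constructor
            · rintro (h | h | h | ⟨h, hcon⟩ | ⟨h, _⟩) <;> omega
            · intro h
              exact Or.inr (Or.inr (Or.inr (Or.inr ⟨by omega, hgt⟩)))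
        _ = (List.replicate size.toNat ("  " : String).toList).set
              (size.toNat - 1) ("* " : String).toList :=
            map_range_ite _ _ _ _ (by omega)
        _ = ((List.replicate size.toNat ("  " : String)).set
              ((List.replicate size.toNat ("  " : String)).length - 1) "* ").map String.toList := by
            simp [List.map_set]
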